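-- pv_equiv track=rewrite | github.com/AmachiInori/VSCode | Python/NLP/dict.py | fullySegment
-- ===== SOURCE A (Python) =====
-- def fullySegment(text, dic):
--     wordList = []
--     for i in range(len(text)):
--         for j in range(i + 1, len(text) + 1):
--             word = text[i : j]
--             if word in dic:
--                 wordList.append(word)
--     return wordList
-- ===== SOURCE B (Python) =====
-- def fullySegment(text, dic):
--     # walk forward from each start index, at most maxlen chars, with O(1) set lookups
--     words = set(dic)
--     maxlen = 0
--     for w in dic:
--         maxlen = max(maxlen, len(w))
--     out = []
--     for i in range(len(text)):
--         word = ""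
--         for ch in text[i : i + maxlen]:
--             word += ch
--             if word in words:
--                 out.append(word)
--     return out
-- ===== Notes on version B (the rewrite author's own statement) =====
-- stated objective: faster
-- what changed: Instead of testing every substring text[i:j] by an O(|dic|) list scan, B builds a set of the dictionary words once, computes the maximum word length, and from each start index walks forward at most maxlen characters, growing the word incrementally and emitting it on an O(1) set hit.
import Mathlib
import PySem

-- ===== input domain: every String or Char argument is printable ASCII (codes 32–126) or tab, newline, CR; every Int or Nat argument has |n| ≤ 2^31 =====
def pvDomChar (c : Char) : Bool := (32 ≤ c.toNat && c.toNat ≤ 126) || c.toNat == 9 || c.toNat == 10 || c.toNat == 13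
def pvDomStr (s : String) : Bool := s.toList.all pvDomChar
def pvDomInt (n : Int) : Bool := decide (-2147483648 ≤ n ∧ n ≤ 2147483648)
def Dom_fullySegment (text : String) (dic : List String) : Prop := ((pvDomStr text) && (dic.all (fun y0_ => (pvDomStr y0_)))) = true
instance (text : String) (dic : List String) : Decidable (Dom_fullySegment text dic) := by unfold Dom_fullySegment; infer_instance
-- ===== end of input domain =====

-- B replaces A's all-substrings scan (each tested by a list scan of dic) with a bounded forward
-- walk from each start index over a set of the dictionary words: a faster algorithm, same output.


-- ===== PORT A =====
def fullySegment (text : String) (dic : List String) : List String :=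
  (PySem.List.pyRange 0 (PySem.Str.len text) 1).foldl (fun wordList i =>
    (PySem.List.pyRange (i + 1) (PySem.Str.len text + 1) 1).foldl (fun wl j =>
      let word := PySem.Str.slice text (some i) (some j)
      if word ∈ dic then wl ++ [word] else wl) wordList) []

-- ===== PORT B =====
-- 'word += ch' builds a string char by char: ported as a List Char accumulator (exact:
-- String.ofList of the accumulated chars is the Python word), window text[i:i+maxlen] via Str.slice.
def fullySegment_alt (text : String) (dic : List String) : List String :=
  let words : PySem.Set String := PySem.Set.ofList dic
  let maxlen : Int := dic.foldl (fun acc w => max acc (PySem.Str.len w)) 0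
  (PySem.List.pyRange 0 (PySem.Str.len text) 1).foldl (fun out i =>
    ((PySem.Str.slice text (some i) (some (i + maxlen))).toList.foldl
      (fun (st : List Char × List String) ch =>
        let w := st.1 ++ [ch]
        if String.ofList w ∈ words then (w, st.2 ++ [String.ofList w]) else (w, st.2))
      ([], out)).2) []

-- ===== PRECONDITION & SPEC =====
def Spec_fullySegment (text : String) (dic : List String) (out : List String) : Prop := out = fullySegment_alt text dic
instance (text : String) (dic : List String) (out : List String) : Decidable (Spec_fullySegment text dic out) := by unfold Spec_fullySegment; infer_instance

-- ===== CLAIM (what is proved, stated in full; the proofs are below) =====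
def Claim_equal_fullySegment : Prop := ∀ (text : String) (dic : List String), Dom_fullySegment text dic → Spec_fullySegment text dic (fullySegment text dic)

-- ===== LEMMAS AND PROOFS =====

-- the strings B's inner walk emits from accumulated word w over remaining chars cs
def pvEmits (words : PySem.Set String) (w : List Char) : List Char → List String
  | [] => []
  | c :: cs => (if String.ofList (w ++ [c]) ∈ words then [String.ofList (w ++ [c])] else [])
      ++ pvEmits words (w ++ [c]) cs

theorem pvFoldB (words : PySem.Set String) (cs : List Char) (w0 : List Char) (out : List String) :
    cs.foldl (fun (st : List Char × List String) ch =>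
        let w := st.1 ++ [ch]
        if String.ofList w ∈ words then (w, st.2 ++ [String.ofList w]) else (w, st.2))
      (w0, out) = (w0 ++ cs, out ++ pvEmits words w0 cs) := by
  induction cs generalizing w0 out with
  | nil => simp [pvEmits]
  | cons c cs ih =>
    rw [List.foldl_cons]
    by_cases h : String.ofList (w0 ++ [c]) ∈ words
    · simp only [h, if_pos]
      rw [ih]
      simp only [pvEmits, if_pos h, List.append_assoc, List.cons_append,
        List.nil_append]
    · simp only [h, if_neg, not_false_iff]
      rw [ih]
      simp only [pvEmits, if_neg h, List.append_assoc, List.cons_append,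
        List.nil_append]

theorem pvEmits_eq (words : PySem.Set String) (cs : List Char) (w : List Char) :
    pvEmits words w cs =
      ((List.range cs.length).map (fun t => String.ofList (w ++ cs.take (t + 1)))).filter
        (fun x => decide (x ∈ words)) := by
  induction cs generalizing w with
  | nil => simp [pvEmits]
  | cons c cs ih =>
    have hm : (List.range (c :: cs).length).map (fun t => String.ofList (w ++ (c :: cs).take (t + 1)))
        = String.ofList (w ++ [c]) ::
          (List.range cs.length).map (fun t => String.ofList ((w ++ [c]) ++ cs.take (t + 1))) := by
      rw [show (c :: cs).length = 1 + cs.length from by simp [Nat.add_comm], List.range_add,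
        List.range_one, List.map_append, List.map_map]
      rw [List.map_cons, List.map_nil, List.singleton_append]
      refine congrArg₂ List.cons (by simp) ?_
      · apply List.map_congr_left
        intro t _
        show String.ofList (w ++ (c :: cs).take (1 + t + 1)) = String.ofList ((w ++ [c]) ++ cs.take (t + 1))
        congr 1
        rw [show 1 + t + 1 = (t + 1) + 1 from by omega, List.take_succ_cons, List.append_cons]
    rw [hm, List.filter_cons, pvEmits, ih (w ++ [c])]
    simp only [decide_eq_true_eq]
    by_cases h : String.ofList (w ++ [c]) ∈ words
    · rw [if_pos h, if_pos h, List.singleton_append]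
    · rw [if_neg h, if_neg h, List.nil_append]

theorem pvCore (dic : List String) (s : List Char) (m : Nat)
    (hdic : ∀ w ∈ dic, w.toList.length ≤ m) :
    ((List.range s.length).map (fun t => String.ofList (s.take (t + 1)))).filter
        (fun x => decide (x ∈ dic))
      = ((List.range (min m s.length)).map (fun t => String.ofList (s.take (t + 1)))).filter
        (fun x => decide (x ∈ dic)) := by
  by_cases h : s.length ≤ m
  · rw [min_eq_right h]
  · rw [min_eq_left (by omega : m ≤ s.length)]
    have hsplit : s.length = m + (s.length - m) := by omega
    rw [hsplit, List.range_add, List.map_append, List.filter_append]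
    have hnil : (((List.range (s.length - m)).map (fun x => m + x)).map
        (fun t => String.ofList (s.take (t + 1)))).filter (fun x => decide (x ∈ dic)) = [] := by
      rw [List.filter_eq_nil_iff]
      intro x hx
      simp only [List.map_map, List.mem_map, List.mem_range, Function.comp] at hx
      obtain ⟨u, hu, rfl⟩ := hx
      simp only [decide_eq_true_eq]
      intro hmem
      have hlen := hdic _ hmem
      rw [String.toList_ofList, List.length_take] at hlen
      omega
    rw [hnil, List.append_nil]

-- ===== VERDICT (by name: the statement is the Claim_ definition above) =====
theorem fullySegment_spec : Claim_equal_fullySegment := by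
  intro text dic _
  show fullySegment text dic = fullySegment_alt text dic
  unfold fullySegment fullySegment_alt
  simp only [PySem.Str.len_eq]
  apply PySem.List.foldl_congr_mem
  intro acc i hi
  rw [PySem.List.mem_pyRange_one] at hi
  obtain ⟨hi0, hin⟩ := hi
  obtain ⟨k, rfl⟩ : ∃ k : Nat, i = (k : Int) := ⟨i.toNat, (Int.toNat_of_nonneg hi0).symm⟩
  have hk : k < text.toList.length := by exact_mod_cast hin
  have hM0 : 0 ≤ dic.foldl (fun acc w => max acc ((w.toList.length : Int))) 0 :=
    (PySem.List.le_foldl_max_int dic (fun w => (w.toList.length : Int)) 0).1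
  set M : Int := dic.foldl (fun acc w => max acc ((w.toList.length : Int))) 0 with hMdef
  set m : Nat := M.toNat with hmdef
  have hMm : M = (m : Int) := by omega
  have hdicm : ∀ w ∈ dic, w.toList.length ≤ m := by
    intro w hw
    have h1 := (PySem.List.le_foldl_max_int dic (fun w => (w.toList.length : Int)) 0).2 w hw
    omega
  set s : List Char := text.toList.drop k with hsdef
  have hslen : s.length = text.toList.length - k := by simp [hsdef]
  -- A's inner loop = filter over all substrings starting at k
  have hA := PySem.List.foldl_append_if
    (fun j => decide (PySem.Str.slice text (some (k : Int)) (some j) ∈ dic))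
    (fun j => PySem.Str.slice text (some (k : Int)) (some j))
    (PySem.List.pyRange ((k : Int) + 1) ((text.toList.length : Int) + 1) 1) acc
  simp only [decide_eq_true_eq] at hA
  rw [hA]
  -- B's inner loop via pvFoldB / pvEmits
  rw [pvFoldB, pvEmits_eq]
  -- identify B's window with s.take m
  have hW : (PySem.Str.slice text (some (k : Int)) (some ((k : Int) + M))).toList = s.take m := by
    rw [PySem.Str.toList_slice, PySem.Chars.slice_eq_listSlice, hMm,
      PySem.List.slice_natCast_add]
  -- A's candidate list = prefixes of s of every length
  have hpt : ∀ t : Nat, PySem.Str.slice text (some (k : Int)) (some ((k : Int) + 1 + (t : Int)))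
      = String.ofList (s.take (t + 1)) := by
    intro t
    apply String.toList_inj.mp
    rw [String.toList_ofList, PySem.Str.toList_slice, PySem.Chars.slice_eq_listSlice]
    have hc : (k : Int) + 1 + (t : Int) = (k : Int) + ((t + 1 : Nat) : Int) := by push_cast; ring
    rw [hc, PySem.List.slice_natCast_add, hsdef]
  have hAlist : ((PySem.List.pyRange ((k : Int) + 1) ((text.toList.length : Int) + 1) 1).filter
        (fun j => decide (PySem.Str.slice text (some (k : Int)) (some j) ∈ dic))).map
        (fun j => PySem.Str.slice text (some (k : Int)) (some j))
      = ((List.range s.length).map (fun t => String.ofList (s.take (t + 1)))).filter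
        (fun x => decide (x ∈ dic)) := by
    rw [List.filter_map]
    rw [PySem.List.pyRange_one]
    have hcnt : (((text.toList.length : Int) + 1) - ((k : Int) + 1)).toNat = s.length := by
      rw [hslen]; omega
    rw [hcnt, List.filter_map]
    simp only [Function.comp_def, hpt]
    rw [List.map_map]
    simp only [Function.comp_def, hpt]
  rw [hAlist]
  show acc ++ _ = acc ++ _
  refine congrArg _ ?_
  simp only [hW, List.nil_append, List.length_take]
  have hq : ∀ x : String, (decide (x ∈ PySem.Set.ofList dic)) = (decide (x ∈ dic)) := by
    intro x
    simp [PySem.Set.mem_ofList]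
  simp only [hq]
  rw [pvCore dic s m hdicm]
  refine congrArg _ ?_
  apply List.map_congr_left
  intro t ht
  rw [List.mem_range] at ht
  congr 1
  rw [List.take_take]
  congr 1
  omega
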